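-- pv_equiv track=rewrite | github.com/msayr/EMalign_3View | arrays/tile_map.py | get_tile_map_margins
-- ===== SOURCE A (Python) =====
-- def get_tile_map_margins(tile_space, margin, margin_boundaries=10):
--
--     '''
--     Compute margin per tile such that no data is cropped out at the boundaries of the image where no stitching is required.
--     This ensures that no data is lost in case stitching between stacks is necessary.
--     '''
--
--     # top, bottom, left, right
--     margin_overrides = {(x,y): [margin_boundaries]*4 for x in range(tile_space[1]) for y in range(tile_space[0])}
--
--     for y in range(0, tile_space[0] - 1):
--         for x in range(0, tile_space[1]):
--             margin_overrides[(x,y)][1] = margin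
--             margin_overrides[(x,y+1)][0] = margin
--
--     for x in range(0, tile_space[1] - 1):
--         for y in range(0, tile_space[0]):
--             margin_overrides[(x,y)][3] = margin
--             margin_overrides[(x+1,y)][2] = margin
--
--     return margin_overrides
-- ===== SOURCE B (Python) =====
-- def get_tile_map_margins(tile_space, margin, margin_boundaries=10):
--     rows, cols = tile_space[0], tile_space[1]
--     return {
--         (x, y): [margin_boundaries if y == 0 else margin,
--                  margin_boundaries if y == rows - 1 else margin,
--                  margin_boundaries if x == 0 else margin,
--                  margin_boundaries if x == cols - 1 else margin]
--         for x in range(cols) for y in range(rows)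
--     }
-- ===== Notes on version B (the rewrite author's own statement) =====
-- stated objective: simpler
-- what changed: Replaces the build-then-two-mutation-passes over a dict of neighbours by a single dict comprehension that computes each tile's four margins directly from its boundary position.
import Mathlib
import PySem

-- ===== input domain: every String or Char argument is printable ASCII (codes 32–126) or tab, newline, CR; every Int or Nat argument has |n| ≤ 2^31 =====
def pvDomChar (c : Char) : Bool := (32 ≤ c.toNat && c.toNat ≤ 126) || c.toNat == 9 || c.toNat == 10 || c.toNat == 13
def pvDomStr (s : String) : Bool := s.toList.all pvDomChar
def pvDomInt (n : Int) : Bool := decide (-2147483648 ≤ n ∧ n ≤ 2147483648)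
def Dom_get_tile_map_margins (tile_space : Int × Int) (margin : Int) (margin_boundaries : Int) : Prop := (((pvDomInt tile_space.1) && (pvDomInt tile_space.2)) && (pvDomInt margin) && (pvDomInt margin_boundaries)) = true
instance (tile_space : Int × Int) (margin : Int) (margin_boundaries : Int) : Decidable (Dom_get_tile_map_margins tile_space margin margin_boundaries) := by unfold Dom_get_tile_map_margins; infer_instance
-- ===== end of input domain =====

-- B replaces A's build-then-two-mutation-passes by one comprehension computing each tile's
-- four margins from its boundary position (objective: simpler).

-- ===== PORT A =====
-- the dict's keys (x,y) are pairwise distinct, so Python's `margin_overrides[(x,y)][i] = margin`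
-- updates exactly the unique entry with that key; pvKeyed/pvUpd do that in-place update (exact here).
def pvKeyed (kx ky : Int) (f : List Int → List Int) (p : Int × Int × List Int) : Int × Int × List Int :=
  if p.1 = kx ∧ p.2.1 = ky then (p.1, p.2.1, f p.2.2) else p

def pvUpd (d : List (Int × Int × List Int)) (kx ky : Int) (f : List Int → List Int) : List (Int × Int × List Int) :=
  d.map (pvKeyed kx ky f)

-- Python's `lst[i] = margin` on the 4-element list is List.set i margin (index always in range here)
def get_tile_map_margins (tile_space : Int × Int) (margin : Int) (margin_boundaries : Int) : List (Int × Int × List Int) :=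
  let d0 := (PySem.List.pyRange 0 tile_space.2 1).flatMap (fun x =>
    (PySem.List.pyRange 0 tile_space.1 1).map (fun y =>
      (x, y, [margin_boundaries, margin_boundaries, margin_boundaries, margin_boundaries])))
  let d1 := (PySem.List.pyRange 0 (tile_space.1 - 1) 1).foldl (fun d y =>
    (PySem.List.pyRange 0 tile_space.2 1).foldl (fun d x =>
      pvUpd (pvUpd d x y (fun l => l.set 1 margin)) x (y + 1) (fun l => l.set 0 margin)) d) d0
  let d2 := (PySem.List.pyRange 0 (tile_space.2 - 1) 1).foldl (fun d x =>
    (PySem.List.pyRange 0 tile_space.1 1).foldl (fun d y =>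
      pvUpd (pvUpd d x y (fun l => l.set 3 margin)) (x + 1) y (fun l => l.set 2 margin)) d) d1
  d2

-- ===== PORT B =====
def get_tile_map_margins_alt (tile_space : Int × Int) (margin : Int) (margin_boundaries : Int) : List (Int × Int × List Int) :=
  (PySem.List.pyRange 0 tile_space.2 1).flatMap (fun x =>
    (PySem.List.pyRange 0 tile_space.1 1).map (fun y =>
      (x, y, [if y = 0 then margin_boundaries else margin,
              if y = tile_space.1 - 1 then margin_boundaries else margin,
              if x = 0 then margin_boundaries else margin,
              if x = tile_space.2 - 1 then margin_boundaries else margin])))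

-- ===== PRECONDITION & SPEC =====
def Spec_get_tile_map_margins (tile_space : Int × Int) (margin : Int) (margin_boundaries : Int) (out : List (Int × Int × List Int)) : Prop := out = get_tile_map_margins_alt tile_space margin margin_boundaries
instance (tile_space : Int × Int) (margin : Int) (margin_boundaries : Int) (out : List (Int × Int × List Int)) : Decidable (Spec_get_tile_map_margins tile_space margin margin_boundaries out) := by unfold Spec_get_tile_map_margins; infer_instance

-- ===== CLAIM (what is proved, stated in full; the proofs are below) =====
def Claim_equal_get_tile_map_margins : Prop := ∀ (tile_space : Int × Int) (margin : Int) (margin_boundaries : Int), Dom_get_tile_map_margins tile_space margin margin_boundaries → Spec_get_tile_map_margins tile_space margin margin_boundaries (get_tile_map_margins tile_space margin margin_boundaries)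

-- ===== LEMMAS AND PROOFS =====

-- a fold that maps the whole list each step equals mapping each element by its own fold
theorem pv_foldl_map_struct {α β : Type} (L : List α) (u : α → β → β) (d : List β) :
    L.foldl (fun d a => d.map (u a)) d = d.map (fun b => L.foldl (fun b a => u a b) b) := by
  induction L generalizing d with
  | nil => simp
  | cons a L ih => simp [List.foldl_cons, ih, List.map_map, Function.comp_def]

-- two nested folds that each map the whole list equal mapping each element by its own double fold
theorem pv_pass_map {α₁ α₂ β : Type} (Ly : List α₁) (Lx : List α₂) (g : α₁ → α₂ → β → β) (d : List β) :
    Ly.foldl (fun d y => Lx.foldl (fun d x => d.map (g y x)) d) d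
      = d.map (fun b => Ly.foldl (fun b y => Lx.foldl (fun b x => g y x b) b) b) := by
  induction Ly generalizing d with
  | nil => simp
  | cons y Ly ih =>
    simp only [List.foldl_cons]
    rw [pv_foldl_map_struct Lx (g y) d, ih, List.map_map]
    rfl

-- nested folds over ranges of keyed-update pairs become one fold over the flattened op list
theorem pv_foldl_nested {α₁ α₂ β γ : Type} (L1 : List α₁) (L2 : List α₂)
    (g : α₁ → α₂ → List γ) (f : β → γ → β) (s : β) :
    L1.foldl (fun s a1 => L2.foldl (fun s a2 => (g a1 a2).foldl f s) s) s
      = (L1.flatMap (fun a1 => L2.flatMap (g a1))).foldl f s := by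
  induction L1 generalizing s with
  | nil => simp
  | cons a L1 ih =>
    simp only [List.foldl_cons, List.flatMap_cons, List.foldl_append, ← List.foldl_flatMap]

-- a fold of keyed updates fixes the key and folds the matching functions over the value
theorem pv_foldl_keyed (ops : List (Int × Int × (List Int → List Int))) (x y : Int) (v : List Int) :
    ops.foldl (fun p o => pvKeyed o.1 o.2.1 o.2.2 p) (x, y, v)
      = (x, y, (ops.filter (fun o => o.1 == x && o.2.1 == y)).foldl (fun v o => o.2.2 v) v) := by
  induction ops generalizing v with
  | nil => simp
  | cons o ops ih =>
    by_cases h : o.1 = x ∧ o.2.1 = y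
    · have hb : (o.1 == x && o.2.1 == y) = true := by simp [h.1, h.2]
      simp only [List.foldl_cons, List.filter_cons, hb, pvKeyed]
      rw [if_pos ⟨h.1.symm, h.2.symm⟩]
      exact ih (o.2.2 v)
    · have hb : (o.1 == x && o.2.1 == y) = false := by
        rcases not_and_or.mp h with h' | h' <;> simp [h']
      simp only [List.foldl_cons, List.filter_cons, hb, pvKeyed]
      rw [if_neg (by rintro ⟨h1, h2⟩; exact h ⟨h1.symm, h2.symm⟩)]
      exact ih v

-- flatMap over a range whose generator is empty except possibly at u and w (u < w)
theorem pv_flatMap_pyRange_two {α : Type} (u w : Int) (huw : u < w) (f : Int → List α)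
    (h : ∀ x', x' ≠ u → x' ≠ w → f x' = []) :
    ∀ (n : Nat) (a b : Int), (b - a).toNat = n →
      (PySem.List.pyRange a b 1).flatMap f
        = (if a ≤ u ∧ u < b then f u else []) ++ (if a ≤ w ∧ w < b then f w else []) := by
  intro n
  induction n with
  | zero =>
    intro a b hn
    have hba : b ≤ a := by omega
    rw [PySem.List.pyRange_one_eq_nil hba]
    rw [if_neg (by omega), if_neg (by omega)]
    simp
  | succ n ih =>
    intro a b hn
    have hab : a < b := by omega
    rw [PySem.List.pyRange_one_cons hab, List.flatMap_cons, ih (a + 1) b (by omega)]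
    by_cases hu : a = u
    · subst hu
      rw [if_neg (show ¬ (a + 1 ≤ a ∧ a < b) by omega),
          if_pos (show a ≤ a ∧ a < b by omega)]
      simp only [show (a + 1 ≤ w ∧ w < b) ↔ (a ≤ w ∧ w < b) from by omega]
      simp
    · by_cases hwa : a = w
      · subst hwa
        rw [if_neg (show ¬ (a + 1 ≤ u ∧ u < b) by omega),
            if_neg (show ¬ (a ≤ u ∧ u < b) by omega),
            if_neg (show ¬ (a + 1 ≤ a ∧ a < b) by omega),
            if_pos (show a ≤ a ∧ a < b by omega)]
        simp
      · rw [h a hu hwa]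
        simp only [show (a + 1 ≤ u ∧ u < b) ↔ (a ≤ u ∧ u < b) from by omega,
                   show (a + 1 ≤ w ∧ w < b) ↔ (a ≤ w ∧ w < b) from by omega]
        simp

-- the per-entry transformation performed by A's two passes, as produced by pv_foldl_map_struct
def pvPhi1 (rows cols margin : Int) (p : Int × Int × List Int) : Int × Int × List Int :=
  (PySem.List.pyRange 0 (rows - 1) 1).foldl (fun b y =>
    (PySem.List.pyRange 0 cols 1).foldl (fun b x =>
      pvKeyed x (y + 1) (fun l => l.set 0 margin) (pvKeyed x y (fun l => l.set 1 margin) b)) b) p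

def pvPhi2 (rows cols margin : Int) (p : Int × Int × List Int) : Int × Int × List Int :=
  (PySem.List.pyRange 0 (cols - 1) 1).foldl (fun b x =>
    (PySem.List.pyRange 0 rows 1).foldl (fun b y =>
      pvKeyed (x + 1) y (fun l => l.set 2 margin) (pvKeyed x y (fun l => l.set 3 margin) b)) b) p

theorem pv_portA_as_map (tile_space : Int × Int) (margin margin_boundaries : Int) :
    get_tile_map_margins tile_space margin margin_boundaries
      = ((PySem.List.pyRange 0 tile_space.2 1).flatMap (fun x =>
          (PySem.List.pyRange 0 tile_space.1 1).map (fun y =>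
            (x, y, [margin_boundaries, margin_boundaries, margin_boundaries, margin_boundaries])))).map
          (fun p => pvPhi2 tile_space.1 tile_space.2 margin (pvPhi1 tile_space.1 tile_space.2 margin p)) := by
  unfold get_tile_map_margins
  simp only [pvUpd, List.map_map]
  rw [pv_pass_map (PySem.List.pyRange 0 (tile_space.1 - 1) 1) (PySem.List.pyRange 0 tile_space.2 1)
        (fun y x => (pvKeyed x (y + 1) fun l => l.set 0 margin) ∘ pvKeyed x y fun l => l.set 1 margin),
      pv_pass_map (PySem.List.pyRange 0 (tile_space.2 - 1) 1) (PySem.List.pyRange 0 tile_space.1 1)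
        (fun x y => (pvKeyed (x + 1) y fun l => l.set 2 margin) ∘ pvKeyed x y fun l => l.set 3 margin),
      List.map_map]
  rfl

-- evaluate the two passes on a single in-grid entry
theorem pv_phi1_eval (rows cols margin : Int) (x y : Int) (v : List Int)
    (hx : 0 ≤ x ∧ x < cols) (hy : 0 ≤ y ∧ y < rows) :
    pvPhi1 rows cols margin (x, y, v)
      = (x, y, ((if 1 ≤ y then [((x, y, fun l => List.set l 0 margin) : Int × Int × (List Int → List Int))] else []) ++
                (if y < rows - 1 then [((x, y, fun l => List.set l 1 margin) : Int × Int × (List Int → List Int))] else [])).foldl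
          (fun v o => o.2.2 v) v) := by
  unfold pvPhi1
  have h0 : (PySem.List.pyRange 0 (rows - 1) 1).foldl (fun b y' =>
        (PySem.List.pyRange 0 cols 1).foldl (fun b x' =>
          pvKeyed x' (y' + 1) (fun l => l.set 0 margin) (pvKeyed x' y' (fun l => l.set 1 margin) b)) b) (x, y, v)
      = ((PySem.List.pyRange 0 (rows - 1) 1).flatMap (fun y' =>
          (PySem.List.pyRange 0 cols 1).flatMap (fun x' =>
            [((x', y', fun l => List.set l 1 margin) : Int × Int × (List Int → List Int)),
             (x', y' + 1, fun l => List.set l 0 margin)]))).foldl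
          (fun p o => pvKeyed o.1 o.2.1 o.2.2 p) (x, y, v) :=
    pv_foldl_nested (PySem.List.pyRange 0 (rows - 1) 1) (PySem.List.pyRange 0 cols 1)
      (fun y' x' => [((x', y', fun l => List.set l 1 margin) : Int × Int × (List Int → List Int)),
                     (x', y' + 1, fun l => List.set l 0 margin)])
      (fun p o => pvKeyed o.1 o.2.1 o.2.2 p) (x, y, v)
  rw [h0, pv_foldl_keyed]
  congr 1
  rw [List.filter_flatMap]
  have hin : ∀ y', ((PySem.List.pyRange 0 cols 1).flatMap (fun x' =>
      ([((x', y', fun l => List.set l 1 margin) : Int × Int × (List Int → List Int)),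
        (x', y' + 1, fun l => List.set l 0 margin)] : List (Int × Int × (List Int → List Int))))).filter
        (fun o => o.1 == x && o.2.1 == y)
      = (if y' = y - 1 then [((x, y, fun l => List.set l 0 margin) : Int × Int × (List Int → List Int))] else []) ++
        (if y' = y then [((x, y, fun l => List.set l 1 margin) : Int × Int × (List Int → List Int))] else []) := by
    intro y'
    rw [List.filter_flatMap]
    rw [pv_flatMap_pyRange_two x (x + 1) (by omega)
        (fun x' => _) (fun x' h1 _ => by simp [h1]) ((cols - 0).toNat) 0 cols rfl]
    rw [if_pos ⟨hx.1, hx.2⟩]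
    have hxx : ¬ (x + 1 = x) := by omega
    by_cases h1 : y' = y
    · simp [h1, hxx, show ¬ (y + 1 = y) from by omega, show ¬ (y = y - 1) from by omega]
    · by_cases h2 : y' = y - 1
      · have h3 : y' + 1 = y := by omega
        simp [h2, hxx]
      · simp [h1, h2, hxx, show ¬ (y' + 1 = y) from by omega]
  rw [List.flatMap_congr (fun y' _ => hin y')]
  rw [pv_flatMap_pyRange_two (y - 1) y (by omega) _ (fun y' h1 h2 => by rw [if_neg h1, if_neg h2]; rfl)
      ((rows - 1 - 0).toNat) 0 (rows - 1) rfl]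
  have e1 : ¬ (y = y - 1) := by omega
  have e2 : (0 ≤ y - 1) ↔ 1 ≤ y := by omega
  have e3 : (y - 1 < rows - 1) ↔ y < rows := by omega
  by_cases hc1 : 1 ≤ y <;> by_cases hc2 : y < rows - 1 <;>
    simp [e1, e3, hc1, hc2, hy.1, hy.2]

theorem pv_phi2_eval (rows cols margin : Int) (x y : Int) (v : List Int)
    (hx : 0 ≤ x ∧ x < cols) (hy : 0 ≤ y ∧ y < rows) :
    pvPhi2 rows cols margin (x, y, v)
      = (x, y, ((if 1 ≤ x then [((x, y, fun l => List.set l 2 margin) : Int × Int × (List Int → List Int))] else []) ++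
                (if x < cols - 1 then [((x, y, fun l => List.set l 3 margin) : Int × Int × (List Int → List Int))] else [])).foldl
          (fun v o => o.2.2 v) v) := by
  unfold pvPhi2
  have h0 : (PySem.List.pyRange 0 (cols - 1) 1).foldl (fun b x' =>
        (PySem.List.pyRange 0 rows 1).foldl (fun b y' =>
          pvKeyed (x' + 1) y' (fun l => l.set 2 margin) (pvKeyed x' y' (fun l => l.set 3 margin) b)) b) (x, y, v)
      = ((PySem.List.pyRange 0 (cols - 1) 1).flatMap (fun x' =>
          (PySem.List.pyRange 0 rows 1).flatMap (fun y' =>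
            [((x', y', fun l => List.set l 3 margin) : Int × Int × (List Int → List Int)),
             (x' + 1, y', fun l => List.set l 2 margin)]))).foldl
          (fun p o => pvKeyed o.1 o.2.1 o.2.2 p) (x, y, v) :=
    pv_foldl_nested (PySem.List.pyRange 0 (cols - 1) 1) (PySem.List.pyRange 0 rows 1)
      (fun x' y' => [((x', y', fun l => List.set l 3 margin) : Int × Int × (List Int → List Int)),
                     (x' + 1, y', fun l => List.set l 2 margin)])
      (fun p o => pvKeyed o.1 o.2.1 o.2.2 p) (x, y, v)
  rw [h0, pv_foldl_keyed]
  congr 1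
  rw [List.filter_flatMap]
  have hin : ∀ x', ((PySem.List.pyRange 0 rows 1).flatMap (fun y' =>
      ([((x', y', fun l => List.set l 3 margin) : Int × Int × (List Int → List Int)),
        (x' + 1, y', fun l => List.set l 2 margin)] : List (Int × Int × (List Int → List Int))))).filter
        (fun o => o.1 == x && o.2.1 == y)
      = (if x' = x - 1 then [((x, y, fun l => List.set l 2 margin) : Int × Int × (List Int → List Int))] else []) ++
        (if x' = x then [((x, y, fun l => List.set l 3 margin) : Int × Int × (List Int → List Int))] else []) := by
    intro x'
    rw [List.filter_flatMap]
    rw [pv_flatMap_pyRange_two y (y + 1) (by omega)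
        (fun y' => _) (fun y' h1 _ => by simp [h1]) ((rows - 0).toNat) 0 rows rfl]
    rw [if_pos ⟨hy.1, hy.2⟩]
    have hyy : ¬ (y + 1 = y) := by omega
    by_cases h1 : x' = x
    · simp [h1, hyy, show ¬ (x + 1 = x) from by omega, show ¬ (x = x - 1) from by omega]
    · by_cases h2 : x' = x - 1
      · have h3 : x' + 1 = x := by omega
        simp [h2, hyy]
      · simp [h1, h2, hyy, show ¬ (x' + 1 = x) from by omega]
  rw [List.flatMap_congr (fun x' _ => hin x')]
  rw [pv_flatMap_pyRange_two (x - 1) x (by omega) _ (fun x' h1 h2 => by rw [if_neg h1, if_neg h2]; rfl)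
      ((cols - 1 - 0).toNat) 0 (cols - 1) rfl]
  have e1 : ¬ (x = x - 1) := by omega
  have e2 : (0 ≤ x - 1) ↔ 1 ≤ x := by omega
  have e3 : (x - 1 < cols - 1) ↔ x < cols := by omega
  by_cases hc1 : 1 ≤ x <;> by_cases hc2 : x < cols - 1 <;>
    simp [e1, e3, hc1, hc2, hx.1, hx.2]

-- ===== VERDICT (by name: the statement is the Claim_ definition above) =====
theorem get_tile_map_margins_spec : Claim_equal_get_tile_map_margins := by
  intro ts margin mb _
  unfold Spec_get_tile_map_margins get_tile_map_margins_alt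
  rw [pv_portA_as_map, List.map_flatMap]
  refine List.flatMap_congr (fun x hx => ?_)
  rw [List.map_map]
  refine List.map_congr_left (fun y hy => ?_)
  rw [PySem.List.mem_pyRange_one] at hx hy
  simp only [Function.comp_apply]
  rw [pv_phi1_eval ts.1 ts.2 margin x y _ ⟨hx.1, hx.2⟩ ⟨hy.1, hy.2⟩,
      pv_phi2_eval ts.1 ts.2 margin x y _ ⟨hx.1, hx.2⟩ ⟨hy.1, hy.2⟩]
  have r1 : (y = 0) ↔ ¬ 1 ≤ y := by omega
  have r2 : (y = ts.1 - 1) ↔ ¬ y < ts.1 - 1 := by omega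
  have r3 : (x = 0) ↔ ¬ 1 ≤ x := by omega
  have r4 : (x = ts.2 - 1) ↔ ¬ x < ts.2 - 1 := by omega
  by_cases c1 : 1 ≤ y <;> by_cases c2 : y < ts.1 - 1 <;> by_cases c3 : 1 ≤ x <;> by_cases c4 : x < ts.2 - 1 <;>
    simp [r1, r2, r3, r4, c1, c2, c3, c4, List.set]
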